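-- pv_equiv track=rewrite | github.com/ssupecial/ps | programmers/lv3/표현 가능한 이진트리.py | solution
-- ===== SOURCE A (Python) =====
-- def convert_two(n):
--     arr = ""
--     while n >= 1:
--         arr = str(n % 2) + arr
--         n = n // 2
--
--     return arr
--
-- def tree(arr):
--     if len(arr) == 1:
--         return True
--
--     if "1" not in arr:
--         return True
--
--     if "0" not in arr:
--         return True
--
--     root = len(arr) // 2
--
--     if arr[root] == "0":
--         return False
--
--     # 왼쪽
--     left = tree(arr[:root])
--
--     # 오른쪽
--     right = tree(arr[root + 1 :])
--
--     return left and right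
--
-- def solution(numbers):
--     answer = []
--     for number in numbers:
--         arr = convert_two(number)
--         length = len(arr)
--
--         i = 0
--         while True:
--             start = 2**i - 1
--             end = 2 ** (i + 1) - 1
--
--             if length > start and length <= end:
--                 diff = end - length
--                 arr = "0" * diff + arr
--                 break
--
--             i += 1
--
--         result = 1 if tree(arr) else 0
--         answer.append(result)
--
--     return answer
-- ===== SOURCE B (Python) =====
-- def solution(numbers):
--     # Flat scan: the padded form of length s = 2**k - 1 is a perfect binary tree
--     # laid out in-order; it is valid iff every non-root position holding a 1 has a
--     # parent position holding a 1 (parent computed by index arithmetic). No recursion,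
--     # no strings: one left-to-right pass over bit positions per number.
--     answer = []
--     for n in numbers:
--         s = 1
--         while 2 ** s <= n:
--             s = 2 * s + 1
--         root = (s + 1) // 2
--         ok = 1
--         j = 1
--         while j <= s:
--             if j != root and (n // 2 ** (s - j)) % 2 == 1:
--                 t = 0
--                 while j % 2 ** (t + 1) == 0:
--                     t = t + 1
--                 if (j // 2 ** (t + 1)) % 2 == 1:
--                     p = j - 2 ** t
--                 else:
--                     p = j + 2 ** t
--                 if (n // 2 ** (s - p)) % 2 == 0:
--                     ok = 0
--                     break
--             j = j + 1
--         answer.append(ok)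
--     return answer
-- ===== Notes on version B (the rewrite author's own statement) =====
-- stated objective: alternative
-- what changed: B replaces A's recursive string check (build the binary string, pad it, slice at the middle at every level and rescan each slice for '0'/'1') by a single flat left-to-right scan over the bit positions of the in-order tree layout: every non-root position holding a 1 must have a 1 at its parent position, with the parent found by index arithmetic (trailing zeros of the position) — no recursion and no strings.
-- outside the precondition, e.g. on solution([0]): A does not finish within the time limit, B returns [1]; on solution([-3]): A does not finish within the time limit, B returns [1]
import Mathlib
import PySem

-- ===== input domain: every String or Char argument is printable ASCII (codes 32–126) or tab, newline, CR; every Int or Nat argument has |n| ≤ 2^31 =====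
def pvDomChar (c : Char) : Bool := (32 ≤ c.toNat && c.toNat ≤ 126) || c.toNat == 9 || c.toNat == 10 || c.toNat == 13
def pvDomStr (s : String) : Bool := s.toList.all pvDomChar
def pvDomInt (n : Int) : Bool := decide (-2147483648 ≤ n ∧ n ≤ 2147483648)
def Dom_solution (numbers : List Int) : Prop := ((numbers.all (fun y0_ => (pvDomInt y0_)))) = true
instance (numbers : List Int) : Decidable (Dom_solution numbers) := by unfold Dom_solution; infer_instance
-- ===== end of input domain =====

-- B replaces A's recursive string check (build binary string, pad, slice at the middle at each
-- level, scan slices for '0'/'1') by a single flat left-to-right scan over bit positions of the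
-- in-order tree layout: every non-root 1-bit must have a 1 at its parent position, computed by
-- index arithmetic — no recursion and no strings.

-- ===== PORT A =====
def convertTwo (n : Int) (arr : List Char) : List Char :=
  if 1 ≤ n then
    convertTwo (PySem.Int.floordiv n 2) (PySem.Int.toChars (PySem.Int.mod n 2) ++ arr)
  else arr
termination_by n.toNat
decreasing_by
  have h2 : PySem.Int.floordiv n 2 = n / 2 := PySem.Int.floordiv_eq_ediv_of_pos (by omega)
  rw [h2]; omega

def treeA (arr : List Char) : Bool :=
  if h1 : arr.length = 1 then true
  else if h2 : ¬ ('1' ∈ arr) then true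
  else if h3 : ¬ ('0' ∈ arr) then true
  else
    let root := arr.length / 2
    -- arr[root] is always in range here (arr contains '1' and length ≠ 1 ⇒ length ≥ 2); the getD default is unreachable
    if PySem.List.pyGetD arr (root : Int) ' ' = '0' then false
    else treeA (arr.take root) && treeA (arr.drop (root + 1))
termination_by arr.length
decreasing_by
  · have hne : arr ≠ [] := by rintro rfl; simp at h2
    have : 0 < arr.length := List.length_pos_of_ne_nil hne
    simp [List.length_take]; omega
  · have hne : arr ≠ [] := by rintro rfl; simp at h2
    have : 0 < arr.length := List.length_pos_of_ne_nil hne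
    simp; omega

def padLoop (arr : List Char) (length : Nat) (fuel i : Nat) : List Char :=
  match fuel with
  | 0 => arr   -- fuel only totalizes Python's `while True`; never reached when 1 ≤ length and fuel = length
  | f + 1 =>
    let start := 2 ^ i - 1
    let stop := 2 ^ (i + 1) - 1
    if length > start ∧ length ≤ stop then List.replicate (stop - length) '0' ++ arr
    else padLoop arr length f (i + 1)

def solution (numbers : List Int) : List Int :=
  numbers.foldl (fun answer number =>
    let arr := convertTwo number []
    let arr2 := padLoop arr arr.length arr.length 0
    answer ++ [if treeA arr2 then (1 : Int) else 0]) []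

-- ===== PORT B =====
def sizeLoop (n : Int) (s : Nat) : Nat :=
  if (2 : Int) ^ s ≤ n then sizeLoop n (2 * s + 1) else s
termination_by n.toNat - s
decreasing_by
  have h1 : s < 2 ^ s := Nat.lt_two_pow_self
  have h2 : ((2 ^ s : Nat) : Int) ≤ n := by push_cast; exact_mod_cast ‹(2:Int) ^ s ≤ n›
  omega

def tzLoop (j : Int) (fuel t : Nat) : Nat :=
  match fuel with
  | 0 => t   -- fuel only totalizes Python's `while j % 2**(t+1) == 0`; never reached when called with fuel = j ≥ 1
  | f + 1 => if PySem.Int.mod j ((2 : Int) ^ (t + 1)) = 0 then tzLoop j f (t + 1) else t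

def scanLoop (n : Int) (s root j : Nat) : Int :=
  if h : j ≤ s then
    if j ≠ root ∧ PySem.Int.mod (PySem.Int.floordiv n ((2 : Int) ^ (s - j))) 2 = 1 then
      let t := tzLoop (j : Int) j 0
      let p := if PySem.Int.mod (PySem.Int.floordiv (j : Int) ((2 : Int) ^ (t + 1))) 2 = 1
               then j - 2 ^ t else j + 2 ^ t
      if PySem.Int.mod (PySem.Int.floordiv n ((2 : Int) ^ (s - p))) 2 = 0 then 0
      else scanLoop n s root (j + 1)
    else scanLoop n s root (j + 1)
  else 1
termination_by s + 1 - j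

def solution_alt (numbers : List Int) : List Int :=
  numbers.foldl (fun answer n =>
    let s := sizeLoop n 1
    answer ++ [scanLoop n s ((s + 1) / 2) 1]) []

-- ===== PRECONDITION & SPEC =====
-- Pre_ excludes numbers with an element ≤ 0: there convert_two yields "" (length 0, or a useless
-- string for negatives) and A's `while True` padding loop never finds a bracket, so A diverges.
def Pre_solution (numbers : List Int) : Prop := ∀ n ∈ numbers, 1 ≤ n
instance (numbers : List Int) : Decidable (Pre_solution numbers) := by unfold Pre_solution; infer_instance
def pvWitness_solution : List Int := [5, 7, 1]

def Spec_solution (numbers : List Int) (out : List Int) : Prop := out = solution_alt numbers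
instance (numbers : List Int) (out : List Int) : Decidable (Spec_solution numbers out) := by unfold Spec_solution; infer_instance

-- ===== CLAIM (what is proved, stated in full; the proofs are below) =====
def Claim_equal_solution : Prop := ∀ (numbers : List Int), Dom_solution numbers → Pre_solution numbers → Spec_solution numbers (solution numbers)

-- ===== LEMMAS AND PROOFS =====

-- ---- the value of a binary string ----
def bitc (c : Char) : Int := if c = '1' then 1 else 0
def val (xs : List Char) : Int := xs.foldl (fun a c => 2 * a + bitc c) 0
theorem bitc_nonneg (c : Char) : 0 ≤ bitc c := by unfold bitc; split <;> omega
theorem bitc_le_one (c : Char) : bitc c ≤ 1 := by unfold bitc; split <;> omega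

theorem val_acc (xs : List Char) : ∀ a : Int,
    xs.foldl (fun a c => 2 * a + bitc c) a = a * 2 ^ xs.length + val xs := by
  induction xs with
  | nil => intro a; simp [val]
  | cons c xs ih =>
    intro a
    simp only [List.foldl_cons, List.length_cons, val] at *
    rw [ih (2 * a + bitc c), ih (2 * 0 + bitc c)]
    ring

theorem val_cons (c : Char) (xs : List Char) : val (c :: xs) = bitc c * 2 ^ xs.length + val xs := by
  have := val_acc xs (2 * 0 + bitc c)
  simp only [val, List.foldl_cons] at *
  rw [this]; ring

theorem val_append (xs ys : List Char) : val (xs ++ ys) = val xs * 2 ^ ys.length + val ys := by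
  simp only [val, List.foldl_append]
  exact val_acc ys _

theorem val_nonneg (xs : List Char) : 0 ≤ val xs := by
  induction xs with
  | nil => simp [val]
  | cons c xs ih =>
    rw [val_cons]
    have := bitc_nonneg c
    positivity

theorem val_lt (xs : List Char) : val xs < 2 ^ xs.length := by
  induction xs with
  | nil => simp [val]
  | cons c xs ih =>
    rw [val_cons]
    have h1 := bitc_le_one c
    have h2 : (0:Int) < 2 ^ xs.length := by positivity
    simp only [List.length_cons, pow_succ]
    nlinarith

theorem val_replicate_zero (m : Nat) : val (List.replicate m '0') = 0 := by
  induction m with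
  | zero => simp [val]
  | succ m ih => rw [List.replicate_succ, val_cons, ih]; simp [bitc]

theorem val_pos_of_mem (xs : List Char) (h : '1' ∈ xs) : 0 < val xs := by
  obtain ⟨s, t, rfl⟩ := List.mem_iff_append.mp h
  rw [val_append, val_cons]
  have h1 := val_nonneg s
  have h2 := val_nonneg t
  have h3 : (0:Int) < 2 ^ t.length := by positivity
  have h4 : (0:Int) < 2 ^ ('1' :: t).length := by positivity
  have h5 : 0 ≤ val s * 2 ^ (t.length + 1) := mul_nonneg h1 (by positivity)
  norm_num [bitc]
  linarith

theorem val_eq_zero_of_not_mem (xs : List Char) (hb : ∀ c ∈ xs, c = '0' ∨ c = '1')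
    (h : '1' ∉ xs) : val xs = 0 := by
  induction xs with
  | nil => simp [val]
  | cons c xs ih =>
    rw [val_cons]
    have hc : c = '0' := by
      rcases hb c List.mem_cons_self with h0 | h1
      · exact h0
      · exact absurd (h1 ▸ List.mem_cons_self) h
    rw [ih (fun c hc => hb c (List.mem_cons_of_mem _ hc)) (fun hm => h (List.mem_cons_of_mem _ hm))]
    simp [hc, bitc]

-- ---- proof-side recursive characterization of A's tree check, on integers ----
def validB (x : Int) (s : Nat) : Bool :=
  if s ≤ 1 then true
  else
    let h := s / 2
    if PySem.Int.mod (PySem.Int.floordiv x (2 ^ h)) 2 = 0 then x = 0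
    else validB (PySem.Int.floordiv x (2 ^ (h + 1))) h && validB (PySem.Int.mod x (2 ^ h)) h
termination_by s
decreasing_by
  all_goals omega

theorem validB_zero (s : Nat) : validB 0 s = true := by
  rw [validB]
  split
  · rfl
  · have h0 : PySem.Int.floordiv 0 (2 ^ (s / 2)) = 0 := by
      rw [PySem.Int.floordiv_eq_ediv_of_pos (by positivity)]; simp
    simp [PySem.Int.mod_eq_emod_of_pos]

theorem validB_step (A B cb : Int) (m : Nat) (hm : 1 ≤ m) (hA : 0 ≤ A) (hB0 : 0 ≤ B)
    (hB : B < 2 ^ m) (hcb : cb = 0 ∨ cb = 1) :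
    validB (A * 2 ^ (m + 1) + cb * 2 ^ m + B) (2 * m + 1) =
      (if cb = 0 then decide (A * 2 ^ (m + 1) + cb * 2 ^ m + B = 0) else validB A m && validB B m) := by
  have hpm : (0:Int) < 2 ^ m := by positivity
  have hdiv2 : (2 * m + 1) / 2 = m := by omega
  set x : Int := A * 2 ^ (m + 1) + cb * 2 ^ m + B with hx
  have hx' : x = (2 * A + cb) * 2 ^ m + B := by rw [hx]; ring
  have hfd : PySem.Int.floordiv x (2 ^ m) = 2 * A + cb := by
    rw [PySem.Int.floordiv_eq_ediv_of_pos hpm, hx', add_comm,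
      Int.add_mul_ediv_right _ _ (ne_of_gt hpm), Int.ediv_eq_zero_of_lt hB0 hB]
    ring
  have hmod2 : PySem.Int.mod (2 * A + cb) 2 = cb := by
    rw [PySem.Int.mod_eq_emod_of_pos (by norm_num)]
    rw [add_comm, Int.add_mul_emod_self_left]
    rcases hcb with rfl | rfl <;> decide
  have hmodm : PySem.Int.mod x (2 ^ m) = B := by
    rw [PySem.Int.mod_eq_emod_of_pos hpm, hx', add_comm, Int.add_mul_emod_self_right,
      Int.emod_eq_of_lt hB0 hB]
  have hfd1 : PySem.Int.floordiv x (2 ^ (m + 1)) = A := by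
    have hx2 : x = B + cb * 2 ^ m + A * 2 ^ (m + 1) := by rw [hx]; ring
    have hlt : B + cb * 2 ^ m < 2 ^ (m + 1) := by
      rcases hcb with rfl | rfl <;> [skip; skip] <;> (rw [pow_succ]; nlinarith)
    have hge : 0 ≤ B + cb * 2 ^ m := by rcases hcb with rfl | rfl <;> nlinarith
    rw [PySem.Int.floordiv_eq_ediv_of_pos (by positivity), hx2,
      Int.add_mul_ediv_right _ _ (by positivity : ((0:Int) < 2 ^ (m+1))).ne',
      Int.ediv_eq_zero_of_lt hge hlt]
    ring
  rw [validB]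
  have hns : ¬ (2 * m + 1 ≤ 1) := by omega
  simp only [if_neg hns, hdiv2, hfd, hfd1, hmodm]
  rcases hcb with rfl | rfl
  · simp
  · rw [hmod2]

theorem treeA_true_of_not_mem0 (arr : List Char) (h : '0' ∉ arr) : treeA arr = true := by
  rw [treeA]; split_ifs <;> simp_all

theorem tree_eq_valid : ∀ k (arr : List Char), (∀ c ∈ arr, c = '0' ∨ c = '1') →
    arr.length = 2 ^ (k + 1) - 1 → treeA arr = validB (val arr) arr.length := by
  intro k
  induction k with
  | zero =>
    intro arr hbin hlen
    norm_num at hlen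
    rw [treeA, validB]
    simp only [hlen]
    norm_num
  | succ k ih =>
    intro arr hbin hlen
    have hp2 : 2 ≤ 2 ^ (k + 1) := by
      have := Nat.one_lt_two_pow (n := k + 1) (by omega); omega
    set p : Nat := 2 ^ (k + 1) with hp
    have h2p : 2 ^ (k + 1 + 1) = 2 * p := by rw [hp]; ring
    have hlen' : arr.length = 2 * p - 1 := by omega
    set m : Nat := p - 1 with hm
    have hm1 : 1 ≤ m := by omega
    have hmlen : arr.length = 2 * m + 1 := by omega
    have hroot : arr.length / 2 = m := by omega
    have hlt : m < arr.length := by omega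
    set c : Char := arr[m] with hc
    set l : List Char := arr.take m with hl
    set r : List Char := arr.drop (m + 1) with hr
    have harr : arr = l ++ c :: r := by
      rw [hl, hr, hc, ← List.drop_eq_getElem_cons hlt, List.take_append_drop]
    have hll : l.length = m := by rw [hl]; simp; omega
    have hrl : r.length = m := by rw [hr]; simp; omega
    have hcl : c ∈ arr := List.getElem_mem hlt
    have hbl : ∀ ch ∈ l, ch = '0' ∨ ch = '1' := fun ch hch => hbin ch (List.mem_of_mem_take hch)
    have hbr : ∀ ch ∈ r, ch = '0' ∨ ch = '1' := fun ch hch => hbin ch (List.mem_of_mem_drop hch)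
    have hlm : l.length = 2 ^ (k + 1) - 1 := by omega
    have hrm : r.length = 2 ^ (k + 1) - 1 := by omega
    have ihl := ih l hbl hlm
    have ihr := ih r hbr hrm
    have hval : val arr = val l * 2 ^ (m + 1) + bitc c * 2 ^ m + val r := by
      conv_lhs => rw [harr]
      rw [val_append, val_cons]
      simp only [List.length_cons, hrl]
      ring
    have hstep := validB_step (val l) (val r) (bitc c) m hm1 (val_nonneg l) (val_nonneg r)
      (by rw [← hrl]; exact val_lt r)
      (by unfold bitc; split <;> simp)
    rw [← hval] at hstep
    rw [treeA]
    rw [dif_neg (by omega : ¬ arr.length = 1)]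
    by_cases h2 : '1' ∈ arr
    · rw [dif_neg (by simpa using h2)]
      by_cases h3 : '0' ∈ arr
      · rw [dif_neg (by simpa using h3)]
        have hget : PySem.List.pyGetD arr ((arr.length / 2 : Nat) : Int) ' ' = c := by
          rw [PySem.List.pyGetD_natCast, hroot, hc]
          exact List.getD_eq_getElem arr ' ' hlt
        simp only [hroot] at hget ⊢
        rw [hget]
        rcases hbin c hcl with hc0 | hc1
        · rw [if_pos hc0, hmlen, hstep]
          have : bitc c = 0 := by rw [hc0]; rfl
          rw [if_pos this]
          have hpos := val_pos_of_mem arr h2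
          simp; omega
        · rw [if_neg (by rw [hc1]; decide), hmlen, hstep]
          have : bitc c = 1 := by rw [hc1]; rfl
          rw [if_neg (by omega)]
          rw [ihl, ihr, hll, hrl]
      · rw [dif_pos (by simpa using h3)]
        have hcne : c ≠ '0' := fun h0 => h3 (h0 ▸ hcl)
        have hc1 : c = '1' := by
          rcases hbin c hcl with h | h
          · exact absurd h hcne
          · exact h
        rw [hmlen, hstep]
        have : bitc c = 1 := by rw [hc1]; rfl
        rw [if_neg (by omega)]
        have htl : validB (val l) m = true := by
          rw [← hll, ← ihl]; exact treeA_true_of_not_mem0 l (fun hx => h3 (List.mem_of_mem_take hx))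
        have htr : validB (val r) m = true := by
          rw [← hrl, ← ihr]; exact treeA_true_of_not_mem0 r (fun hx => h3 (List.mem_of_mem_drop hx))
        rw [htl, htr]
        rfl
    · rw [dif_pos (by simpa using h2)]
      rw [val_eq_zero_of_not_mem arr hbin h2, validB_zero]

theorem convert_acc : ∀ m : Nat, ∀ n : Int, n.toNat ≤ m → ∀ acc,
    convertTwo n acc = convertTwo n [] ++ acc := by
  intro m
  induction m with
  | zero =>
    intro n hn acc
    have hneg : ¬ (1:Int) ≤ n := by omega
    rw [convertTwo, if_neg hneg]
    conv_rhs => rw [convertTwo, if_neg hneg]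
    simp
  | succ m ih =>
    intro n hn acc
    by_cases h1 : 1 ≤ n
    · have hfd : PySem.Int.floordiv n 2 = n / 2 := PySem.Int.floordiv_eq_ediv_of_pos (by omega)
      have hlt : (n / 2).toNat ≤ m := by omega
      rw [convertTwo, if_pos h1]
      conv_rhs => rw [convertTwo, if_pos h1]
      rw [hfd, ih _ hlt, ih _ hlt (PySem.Int.toChars (PySem.Int.mod n 2) ++ [])]
      simp
    · rw [convertTwo, if_neg h1, convertTwo, if_neg h1]
      simp

theorem convert_spec : ∀ m : Nat, ∀ n : Int, n.toNat ≤ m → 1 ≤ n →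
    (∀ c ∈ convertTwo n [], c = '0' ∨ c = '1') ∧ val (convertTwo n []) = n ∧
    0 < (convertTwo n []).length ∧
    (2 : Int) ^ ((convertTwo n []).length - 1) ≤ n ∧ n < 2 ^ (convertTwo n []).length := by
  intro m
  induction m with
  | zero => intro n hn h1; omega
  | succ m ih =>
    intro n hn h1
    have hfd : PySem.Int.floordiv n 2 = n / 2 := PySem.Int.floordiv_eq_ediv_of_pos (by omega)
    have hmod : PySem.Int.mod n 2 = n % 2 := PySem.Int.mod_eq_emod_of_pos (by omega)
    have hd : PySem.Int.toChars (PySem.Int.mod n 2) = [if n % 2 = 1 then '1' else '0'] := by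
      rw [hmod]
      have : n % 2 = 0 ∨ n % 2 = 1 := by omega
      rcases this with h | h <;> rw [h] <;> decide
    have hbd : bitc (if n % 2 = 1 then '1' else '0') = n % 2 := by
      have : n % 2 = 0 ∨ n % 2 = 1 := by omega
      rcases this with h | h <;> rw [h] <;> simp [bitc]
    have hstep : convertTwo n [] = convertTwo (n / 2) [] ++ [if n % 2 = 1 then '1' else '0'] := by
      conv_lhs => rw [convertTwo]
      rw [if_pos h1, hfd, hd, convert_acc m (n / 2) (by omega)]
      simp
    by_cases h2 : n = 1
    · subst h2
      have hbase : convertTwo ((1:Int) / 2) [] = [] := by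
        have h0 : ((1:Int) / 2) = 0 := by norm_num
        rw [h0, convertTwo, if_neg (by norm_num)]
      have hd1 : (if (1:Int) % 2 = 1 then '1' else '0') = '1' := by norm_num
      rw [hstep, hbase, hd1]
      simp only [List.nil_append]
      refine ⟨?_, by decide, by simp, by norm_num, by norm_num⟩
      intro ch hch
      simp at hch
      exact Or.inr hch
    · have hn2 : 1 ≤ n / 2 := by omega
      obtain ⟨ihb, ihv, ihl, ihlo, ihhi⟩ := ih (n / 2) (by omega) hn2
      rw [hstep]
      set xs := convertTwo (n / 2) [] with hxs
      set d : Char := if n % 2 = 1 then '1' else '0' with hdd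
      have hdbin : d = '0' ∨ d = '1' := by rw [hdd]; split <;> simp
      constructor
      · intro ch hch
        rcases List.mem_append.mp hch with h | h
        · exact ihb ch h
        · rcases List.mem_singleton.mp h with rfl; exact hdbin
      have hvv : val (xs ++ [d]) = 2 * (n / 2) + n % 2 := by
        have hvd : val [d] = bitc d := by show 2 * 0 + bitc d = bitc d; ring
        rw [val_append, hvd, hbd, ihv]
        simp only [List.length_cons, List.length_nil, pow_one]
        ring
      have hlen : (xs ++ [d]).length = xs.length + 1 := by simp
      refine ⟨by rw [hvv]; omega, by omega, ?_, ?_⟩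
      · rw [hlen]
        have : (2:Int) ^ (xs.length + 1 - 1) = 2 ^ (xs.length - 1) * 2 := by
          rw [← pow_succ]
          congr 1
          omega
        rw [this]
        omega
      · rw [hlen, pow_succ]
        omega

theorem padLoop_spec (arr : List Char) (L : Nat) (h1 : 1 ≤ L) :
    ∀ fuel i, i ≤ Nat.log 2 L → Nat.log 2 L < i + fuel → 2 ^ i ≤ L →
    padLoop arr L fuel i = List.replicate (2 ^ (Nat.log 2 L + 1) - 1 - L) '0' ++ arr := by
  intro fuel
  induction fuel with
  | zero => intro i hi hif _; omega
  | succ f ihf =>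
    intro i hi hif hpi
    rw [padLoop]
    by_cases hcase : i = Nat.log 2 L
    · subst hcase
      have hub : L < 2 ^ (Nat.log 2 L + 1) := Nat.lt_pow_succ_log_self (by norm_num) L
      rw [if_pos ⟨by omega, by omega⟩]
    · have hil : i + 1 ≤ Nat.log 2 L := by omega
      have h2i : 2 ^ (i + 1) ≤ L := by
        calc 2 ^ (i + 1) ≤ 2 ^ (Nat.log 2 L) := Nat.pow_le_pow_right (by norm_num) hil
        _ ≤ L := Nat.pow_log_le_self 2 (by omega)
      rw [if_neg (by omega)]
      exact ihf (i + 1) hil (by omega) h2i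

theorem sizeLoop_spec (n : Int) (L : Nat) (h1 : 1 ≤ L)
    (hlo : (2 : Int) ^ (L - 1) ≤ n) (hhi : n < 2 ^ L) :
    ∀ m j, L ≤ j + m → 1 ≤ j → 2 ^ (j - 1) - 1 < L →
    sizeLoop n (2 ^ j - 1) = 2 ^ (Nat.log 2 L + 1) - 1 := by
  have hkey : ∀ s : Nat, ((2 : Int) ^ s ≤ n ↔ s < L) := by
    intro s
    constructor
    · intro h
      by_contra hc
      have hsl : L ≤ s := by omega
      have : (2:Int) ^ L ≤ 2 ^ s := pow_le_pow_right₀ (by norm_num) hsl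
      omega
    · intro h
      have hsl : s ≤ L - 1 := by omega
      calc (2:Int) ^ s ≤ 2 ^ (L - 1) := pow_le_pow_right₀ (by norm_num) hsl
      _ ≤ n := hlo
  have hstop : ∀ j, 1 ≤ j → 2 ^ (j - 1) - 1 < L → L ≤ 2 ^ j - 1 → j = Nat.log 2 L + 1 := by
    intro j hj1 hjlt hup
    have hj2 : 2 ^ (j - 1) ≤ L := by omega
    have hle : j - 1 ≤ Nat.log 2 L := (Nat.pow_le_iff_le_log (b := 2) (y := L) (by norm_num) (by omega)).mp hj2
    have hlt2 : Nat.log 2 L < j := Nat.log_lt_of_lt_pow (by omega) (by omega)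
    omega
  intro m
  induction m with
  | zero =>
    intro j hj hj1 hjlt
    have hjj : j < 2 ^ j := Nat.lt_two_pow_self
    have hup : L ≤ 2 ^ j - 1 := by omega
    rw [sizeLoop, if_neg (by rw [hkey]; omega)]
    rw [hstop j hj1 hjlt hup]
  | succ m ihm =>
    intro j hj hj1 hjlt
    rw [sizeLoop]
    by_cases hc : 2 ^ j - 1 < L
    · rw [if_pos ((hkey _).mpr hc)]
      have hrw : 2 * (2 ^ j - 1) + 1 = 2 ^ (j + 1) - 1 := by
        have h1p : 1 ≤ 2 ^ j := Nat.one_le_two_pow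
        have h2p : 2 ^ (j + 1) = 2 * 2 ^ j := by ring
        omega
      rw [hrw]
      exact ihm (j + 1) (by omega) (by omega) (by simpa using hc)
    · rw [if_neg (by rw [hkey]; omega)]
      rw [hstop j hj1 hjlt (by omega)]

-- ---- the flat parent-scan side ----
def bitm (x : Int) (i : Nat) : Int := (x / 2 ^ i) % 2
def tzN (j : Nat) : Nat := padicValNat 2 j
def parentIdx (j : Nat) : Nat :=
  if (j / 2 ^ (tzN j + 1)) % 2 = 1 then j - 2 ^ tzN j else j + 2 ^ tzN j
def okAt (n : Int) (s j : Nat) : Prop :=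
  j = (s + 1) / 2 ∨ bitm n (s - j) ≠ 1 ∨ bitm n (s - parentIdx j) = 1
def flatOK (n : Int) (k : Nat) : Prop :=
  ∀ j, 1 ≤ j → j ≤ 2 ^ (k + 1) - 1 → okAt n (2 ^ (k + 1) - 1) j

theorem tz_dvd (j : Nat) : 2 ^ tzN j ∣ j := pow_padicValNat_dvd

theorem tz_not_dvd (j : Nat) (hj : j ≠ 0) : ¬ 2 ^ (tzN j + 1) ∣ j :=
  pow_succ_padicValNat_not_dvd hj

theorem tz_eq_of (j t : Nat) (hj : j ≠ 0) (h1 : 2 ^ t ∣ j) (h2 : ¬ 2 ^ (t + 1) ∣ j) :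
    tzN j = t := by
  by_contra hne
  rcases Nat.lt_or_ge (tzN j) t with h | h
  · exact tz_not_dvd j hj ((pow_dvd_pow 2 (by omega)).trans h1)
  · have ht : t + 1 ≤ tzN j := by omega
    exact h2 ((pow_dvd_pow 2 ht).trans (tz_dvd j))

theorem tz_lt_of (j k : Nat) (hj : 1 ≤ j) (hk : j < 2 ^ k) : tzN j < k := by
  have h1 : 2 ^ tzN j ≤ j := Nat.le_of_dvd (by omega) (tz_dvd j)
  have h2 : 2 ^ tzN j < 2 ^ k := by omega
  exact (Nat.pow_lt_pow_iff_right (by norm_num)).mp h2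

theorem tz_pow (a : Nat) : tzN (2 ^ a) = a := by
  refine tz_eq_of _ _ (by positivity) dvd_rfl ?_
  intro h
  have := Nat.le_of_dvd (by positivity) h
  have := Nat.pow_lt_pow_succ (a := 2) (n := a) (by norm_num)
  omega

theorem tz_add_pow (k i : Nat) (h1 : 1 ≤ i) (h2 : i < 2 ^ k) : tzN (2 ^ k + i) = tzN i := by
  have ht : tzN i < k := tz_lt_of i k h1 h2
  refine tz_eq_of _ _ (by omega) ?_ ?_
  · exact Dvd.dvd.add (pow_dvd_pow 2 (by omega)) (tz_dvd i)
  · intro h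
    have hk2 : 2 ^ (tzN i + 1) ∣ 2 ^ k := pow_dvd_pow 2 (by omega)
    have : 2 ^ (tzN i + 1) ∣ i := (Nat.dvd_add_right hk2).mp h
    exact tz_not_dvd i (by omega) this

theorem tz_split (j : Nat) (hj : j ≠ 0) :
    j = (j / 2 ^ (tzN j + 1)) * 2 ^ (tzN j + 1) + 2 ^ tzN j := by
  have hd : 2 ^ tzN j ∣ j % 2 ^ (tzN j + 1) :=
    (Nat.dvd_mod_iff (pow_dvd_pow 2 (by omega))).mpr (tz_dvd j)
  have hlt : j % 2 ^ (tzN j + 1) < 2 ^ (tzN j + 1) := Nat.mod_lt _ (by positivity)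
  have hne : j % 2 ^ (tzN j + 1) ≠ 0 := fun h => tz_not_dvd j hj (Nat.dvd_of_mod_eq_zero h)
  obtain ⟨q, hq⟩ := hd
  have hp : 2 ^ (tzN j + 1) = 2 ^ tzN j * 2 := by rw [pow_succ]
  have hq1 : q = 1 := by
    rcases Nat.lt_or_ge q 2 with h | h
    · interval_cases q <;> simp_all
    · exfalso; rw [hq, hp] at hlt; nlinarith [Nat.one_le_two_pow (n := tzN j)]
  have hdm := Nat.div_add_mod j (2 ^ (tzN j + 1))
  rw [hq, hq1, mul_one] at hdm
  obtain ⟨w, hw⟩ : ∃ w, w = j / 2 ^ (tzN j + 1) * 2 ^ (tzN j + 1) := ⟨_, rfl⟩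
  rw [Nat.mul_comm] at hdm
  rw [← hw] at hdm ⊢
  omega

theorem parent_pow (k : Nat) (hk : 1 ≤ k) : parentIdx (2 ^ (k - 1)) = 2 ^ k := by
  unfold parentIdx
  rw [tz_pow]
  have hkk : k - 1 + 1 = k := by omega
  rw [hkk]
  have hdiv : 2 ^ (k - 1) / 2 ^ k = 0 :=
    Nat.div_eq_of_lt (Nat.pow_lt_pow_right (by norm_num) (by omega))
  rw [hdiv]
  norm_num
  have hpk : (2:Nat) ^ k = 2 ^ (k - 1) * 2 := by rw [← pow_succ]; congr 1; omega
  omega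

theorem tz_le_sub2 (k i : Nat) (hk : 1 ≤ k) (h1 : 1 ≤ i) (h2 : i ≤ 2 ^ k - 1)
    (hne : i ≠ 2 ^ (k - 1)) : tzN i + 2 ≤ k := by
  have hik : i < 2 ^ k := by have : 1 ≤ 2 ^ k := Nat.one_le_two_pow; omega
  have hlt : tzN i < k := tz_lt_of i k h1 hik
  by_contra hc
  have heq : tzN i = k - 1 := by omega
  obtain ⟨q, hq⟩ := tz_dvd i
  rw [heq] at hq
  have hpk : 2 ^ k = 2 ^ (k - 1) * 2 := by rw [← pow_succ]; congr 1; omega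
  have hq1 : q = 1 := by nlinarith [Nat.one_le_two_pow (n := k - 1)]
  rw [hq1, mul_one] at hq
  exact hne hq

theorem parent_range (k i : Nat) (hk : 1 ≤ k) (h1 : 1 ≤ i) (h2 : i ≤ 2 ^ k - 1)
    (hne : i ≠ 2 ^ (k - 1)) : 1 ≤ parentIdx i ∧ parentIdx i ≤ 2 ^ k - 1 := by
  have hts : tzN i + 2 ≤ k := tz_le_sub2 k i hk h1 h2 hne
  have hsp := tz_split i (by omega)
  unfold parentIdx
  obtain ⟨t, htt⟩ : ∃ t, t = tzN i := ⟨_, rfl⟩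
  rw [← htt] at hsp hts ⊢
  obtain ⟨a, ha⟩ : ∃ a, a = i / 2 ^ (t + 1) := ⟨_, rfl⟩
  rw [← ha] at hsp ⊢
  have hp1 : (2:Nat) ^ (t + 1) = 2 ^ t * 2 := by rw [pow_succ]
  have hp2 : (2:Nat) ^ (t + 2) = 2 ^ (t + 1) * 2 := by rw [pow_succ]
  have h1t : 1 ≤ 2 ^ t := Nat.one_le_two_pow
  by_cases hpar : a % 2 = 1
  · rw [if_pos hpar]
    have ha1 : 1 ≤ a := by omega
    have hle : 2 ^ (t + 1) ≤ a * 2 ^ (t + 1) := Nat.le_mul_of_pos_left _ (by omega)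
    obtain ⟨w, hw⟩ : ∃ w, w = a * 2 ^ (t + 1) := ⟨_, rfl⟩
    rw [← hw] at hsp hle
    omega
  · rw [if_neg hpar]
    have hae : a % 2 = 0 := by omega
    obtain ⟨b, hb⟩ := Nat.dvd_of_mod_eq_zero hae
    have hk2 : 2 ^ k = 2 ^ (k - t - 2) * 2 ^ (t + 2) := by
      rw [← pow_add]; congr 1; omega
    have hi2 : i = b * 2 ^ (t + 2) + 2 ^ t := by
      rw [hsp, hb, hp2]; ring
    have hblt : b * 2 ^ (t + 2) < 2 ^ (k - t - 2) * 2 ^ (t + 2) := by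
      have h1k : 1 ≤ 2 ^ k := Nat.one_le_two_pow
      obtain ⟨w, hw⟩ : ∃ w, w = b * 2 ^ (t + 2) := ⟨_, rfl⟩
      rw [← hw] at hi2 ⊢
      omega
    have hbc : b < 2 ^ (k - t - 2) := Nat.lt_of_mul_lt_mul_right hblt
    have hble : (b + 1) * 2 ^ (t + 2) ≤ 2 ^ k := by
      rw [hk2]; exact Nat.mul_le_mul_right _ (by omega)
    rw [Nat.succ_mul] at hble
    obtain ⟨w, hw⟩ : ∃ w, w = b * 2 ^ (t + 2) := ⟨_, rfl⟩
    rw [← hw] at hi2 hble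
    omega

theorem parent_add_pow_root (k : Nat) (hk : 1 ≤ k) :
    parentIdx (2 ^ k + 2 ^ (k - 1)) = 2 ^ k := by
  have hpk : (2:Nat) ^ k = 2 ^ (k - 1) * 2 := by rw [← pow_succ]; congr 1; omega
  have h1 : 1 ≤ 2 ^ (k - 1) := Nat.one_le_two_pow
  have htz : tzN (2 ^ k + 2 ^ (k - 1)) = k - 1 := by
    rw [tz_add_pow k _ (by omega) (by omega), tz_pow]
  unfold parentIdx
  rw [htz]
  have hkk : k - 1 + 1 = k := by omega
  rw [hkk]
  have hdiv : (2 ^ k + 2 ^ (k - 1)) / 2 ^ k = 1 := by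
    rw [Nat.add_div_left _ (by positivity), Nat.div_eq_of_lt (by omega)]
  rw [hdiv]
  rw [if_pos (by norm_num : 1 % 2 = 1)]
  omega

theorem parent_add_pow (k i : Nat) (hk : 1 ≤ k) (h1 : 1 ≤ i) (h2 : i ≤ 2 ^ k - 1)
    (hne : i ≠ 2 ^ (k - 1)) : parentIdx (2 ^ k + i) = 2 ^ k + parentIdx i := by
  have hts : tzN i + 2 ≤ k := tz_le_sub2 k i hk h1 h2 hne
  have hik : i < 2 ^ k := by have : 1 ≤ 2 ^ k := Nat.one_le_two_pow; omega
  have htz : tzN (2 ^ k + i) = tzN i := tz_add_pow k i h1 hik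
  have hsp := tz_split i (by omega)
  obtain ⟨t, htt⟩ : ∃ t, t = tzN i := ⟨_, rfl⟩
  rw [← htt] at hsp hts
  have hkt : (2:Nat) ^ k = 2 ^ (k - t - 1) * 2 ^ (t + 1) := by
    rw [← pow_add]; congr 1; omega
  have hdiv : (2 ^ k + i) / 2 ^ (t + 1) = 2 ^ (k - t - 1) + i / 2 ^ (t + 1) := by
    rw [hkt, add_comm (2 ^ (k - t - 1) * 2 ^ (t + 1)) i,
      Nat.add_mul_div_right _ _ (by positivity : (0:Nat) < 2 ^ (t + 1)), add_comm]
  have heven : 2 ^ (k - t - 1) % 2 = 0 := by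
    have : k - t - 1 = (k - t - 2) + 1 := by omega
    rw [this, pow_succ, Nat.mul_mod_left]
  have hmod : (2 ^ (k - t - 1) + i / 2 ^ (t + 1)) % 2 = i / 2 ^ (t + 1) % 2 := by
    omega
  have h2t : 2 ^ t ≤ i := by
    rw [htt]; exact Nat.le_of_dvd (by omega) (tz_dvd i)
  unfold parentIdx
  rw [htz, ← htt, hdiv, hmod]
  by_cases hpar : i / 2 ^ (t + 1) % 2 = 1
  · rw [if_pos hpar, if_pos hpar]; omega
  · rw [if_neg hpar, if_neg hpar]; omega

theorem bitm_zero (i : Nat) : bitm 0 i = 0 := by simp [bitm]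

theorem bitm_cases (x : Int) (i : Nat) : bitm x i = 0 ∨ bitm x i = 1 := by
  unfold bitm; omega

theorem bitm_high (A c B : Int) (m i : Nat) (hc : c = 0 ∨ c = 1) (hB0 : 0 ≤ B) (hB : B < 2 ^ m) :
    bitm (A * 2 ^ (m + 1) + c * 2 ^ m + B) (m + 1 + i) = bitm A i := by
  have hpm : (0:Int) < 2 ^ m := by positivity
  have hdiv1 : (A * 2 ^ (m + 1) + c * 2 ^ m + B) / 2 ^ (m + 1) = A := by
    have hx : A * 2 ^ (m + 1) + c * 2 ^ m + B = (c * 2 ^ m + B) + A * 2 ^ (m + 1) := by ring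
    have hlt : c * 2 ^ m + B < 2 ^ (m + 1) := by
      rcases hc with rfl | rfl <;> (rw [pow_succ]; nlinarith)
    have hge : 0 ≤ c * 2 ^ m + B := by rcases hc with rfl | rfl <;> nlinarith
    rw [hx, Int.add_mul_ediv_right _ _ (by positivity : ((0:Int) < 2 ^ (m + 1))).ne',
      Int.ediv_eq_zero_of_lt hge hlt, zero_add]
  unfold bitm
  rw [show (2:Int) ^ (m + 1 + i) = 2 ^ (m + 1) * 2 ^ i by rw [pow_add],
    ← Int.ediv_ediv_of_nonneg (show (0:Int) ≤ 2 ^ (m + 1) by positivity), hdiv1]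

theorem bitm_mid (A c B : Int) (m : Nat) (hc : c = 0 ∨ c = 1) (hB0 : 0 ≤ B) (hB : B < 2 ^ m) :
    bitm (A * 2 ^ (m + 1) + c * 2 ^ m + B) m = c := by
  have hpm : (0:Int) < 2 ^ m := by positivity
  have hdiv : (A * 2 ^ (m + 1) + c * 2 ^ m + B) / 2 ^ m = c + 2 * A := by
    have hx : A * 2 ^ (m + 1) + c * 2 ^ m + B = B + (c + 2 * A) * 2 ^ m := by
      rw [pow_succ]; ring
    rw [hx, Int.add_mul_ediv_right _ _ (ne_of_gt hpm), Int.ediv_eq_zero_of_lt hB0 hB, zero_add]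
  unfold bitm
  rw [hdiv, Int.add_mul_emod_self_left]
  rcases hc with rfl | rfl <;> decide

theorem bitm_low (A c B : Int) (m i : Nat) (hi : i < m) (hB0 : 0 ≤ B) :
    bitm (A * 2 ^ (m + 1) + c * 2 ^ m + B) i = bitm B i := by
  have hu : m = i + (m - i - 1) + 1 := by omega
  set u : Nat := m - i - 1 with hudef
  have hx : A * 2 ^ (m + 1) + c * 2 ^ m + B
      = B + (2 * (A * 2 ^ (u + 1) + c * 2 ^ u)) * 2 ^ i := by
    rw [hu]
    simp only [pow_add, pow_succ, pow_zero]
    ring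
  unfold bitm
  rw [hx, Int.add_mul_ediv_right _ _ (by positivity : ((0:Int) < 2 ^ i)).ne',
    Int.add_mul_emod_self_left]

theorem decomp (x : Int) (m : Nat) (hx0 : 0 ≤ x) (hx : x < 2 ^ (2 * m + 1)) :
    x = (x / 2 ^ (m + 1)) * 2 ^ (m + 1) + bitm x m * 2 ^ m + x % 2 ^ m ∧
    0 ≤ x / 2 ^ (m + 1) ∧ x / 2 ^ (m + 1) < 2 ^ m ∧ (bitm x m = 0 ∨ bitm x m = 1) ∧
    0 ≤ x % 2 ^ m ∧ x % 2 ^ m < 2 ^ m := by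
  have hpm : (0:Int) < 2 ^ m := by positivity
  have hsucc : (2:Int) ^ (m + 1) = 2 ^ m * 2 := by rw [pow_succ]
  have hdd : x / 2 ^ (m + 1) = x / 2 ^ m / 2 := by
    rw [hsucc]
    exact (Int.ediv_ediv_of_nonneg (le_of_lt hpm)).symm
  have hsplit1 : x = (x / 2 ^ m) * 2 ^ m + x % 2 ^ m := by
    rw [mul_comm]; exact (Int.mul_ediv_add_emod x (2 ^ m)).symm
  have hsplit2 : x / 2 ^ m = (x / 2 ^ m / 2) * 2 + (x / 2 ^ m) % 2 := by
    rw [mul_comm]; exact (Int.mul_ediv_add_emod (x / 2 ^ m) 2).symm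
  refine ⟨?_, Int.ediv_nonneg hx0 (by positivity), ?_, by unfold bitm; omega,
    Int.emod_nonneg x (ne_of_gt hpm), Int.emod_lt_of_pos x hpm⟩
  · unfold bitm
    calc x = (x / 2 ^ m) * 2 ^ m + x % 2 ^ m := hsplit1
    _ = ((x / 2 ^ m / 2) * 2 + (x / 2 ^ m) % 2) * 2 ^ m + x % 2 ^ m := by rw [← hsplit2]
    _ = (x / 2 ^ (m + 1)) * 2 ^ (m + 1) + (x / 2 ^ m) % 2 * 2 ^ m + x % 2 ^ m := by
        rw [hdd, hsucc]; ring
  · have hxlt : x < 2 ^ m * 2 ^ (m + 1) := by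
      rw [← pow_add]
      have : m + (m + 1) = 2 * m + 1 := by omega
      rw [this]; exact hx
    rw [Int.ediv_lt_iff_lt_mul (by positivity)]
    linarith [hxlt]

theorem flat_decomp (k m : Nat) (hk : 1 ≤ k) (hm : m = 2 ^ k - 1)
    (A c B : Int) (hA0 : 0 ≤ A) (hA : A < 2 ^ m)
    (hc : c = 0 ∨ c = 1) (hB0 : 0 ≤ B) (hB : B < 2 ^ m) :
    flatOK (A * 2 ^ (m + 1) + c * 2 ^ m + B) k ↔
      flatOK A (k - 1) ∧ flatOK B (k - 1) ∧
      (bitm A (2 ^ (k - 1) - 1) = 1 → c = 1) ∧ (bitm B (2 ^ (k - 1) - 1) = 1 → c = 1) := by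
  have h2k : 2 ≤ 2 ^ k := by
    calc (2:Nat) = 2 ^ 1 := rfl
    _ ≤ 2 ^ k := Nat.pow_le_pow_right (by norm_num) hk
  have hm1 : 1 ≤ m := by omega
  have hkk : k - 1 + 1 = k := by omega
  have hS : 2 ^ (k + 1) - 1 = 2 * m + 1 := by
    have : (2:Nat) ^ (k + 1) = 2 * 2 ^ k := by rw [pow_succ]; ring
    omega
  have hm2 : m + 1 = 2 ^ k := by omega
  have hsub : 2 ^ (k - 1 + 1) - 1 = m := by rw [hkk]; omega
  have hsr2 : 2 * 2 ^ (k - 1) = 2 ^ k := by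
    conv_rhs => rw [← hkk]
    rw [pow_succ]; ring
  have hsubroot : (m + 1) / 2 = 2 ^ (k - 1) := by omega
  have h2k1 : 1 ≤ 2 ^ (k - 1) := Nat.one_le_two_pow
  have hsrm : 2 ^ (k - 1) ≤ m := by omega
  have hbH : ∀ i, bitm (A * 2 ^ (m + 1) + c * 2 ^ m + B) (m + 1 + i) = bitm A i :=
    fun i => bitm_high A c B m i hc hB0 hB
  have hbM : bitm (A * 2 ^ (m + 1) + c * 2 ^ m + B) m = c := bitm_mid A c B m hc hB0 hB
  have hbL : ∀ i, i < m → bitm (A * 2 ^ (m + 1) + c * 2 ^ m + B) i = bitm B i :=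
    fun i hi => bitm_low A c B m i hi hB0
  have hrootS : (2 * m + 1 + 1) / 2 = m + 1 := by omega
  -- pointwise translations
  have okLeft : ∀ j, 1 ≤ j → j ≤ m → j ≠ 2 ^ (k - 1) →
      (okAt (A * 2 ^ (m + 1) + c * 2 ^ m + B) (2 * m + 1) j ↔ okAt A m j) := by
    intro j hj1 hj2 hjne
    obtain ⟨hp1, hp2⟩ := parent_range k j hk hj1 (by omega) hjne
    unfold okAt
    rw [hrootS, hsubroot,
      show 2 * m + 1 - j = m + 1 + (m - j) by omega,
      show 2 * m + 1 - parentIdx j = m + 1 + (m - parentIdx j) by omega,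
      hbH, hbH]
    constructor
    · rintro (h | h | h)
      · exact absurd h (by omega)
      · exact Or.inr (Or.inl h)
      · exact Or.inr (Or.inr h)
    · rintro (h | h | h)
      · exact absurd h hjne
      · exact Or.inr (Or.inl h)
      · exact Or.inr (Or.inr h)
  have okLeftRoot :
      okAt (A * 2 ^ (m + 1) + c * 2 ^ m + B) (2 * m + 1) (2 ^ (k - 1)) ↔
        (bitm A (2 ^ (k - 1) - 1) = 1 → c = 1) := by
    unfold okAt
    rw [hrootS, parent_pow k hk,
      show 2 * m + 1 - 2 ^ (k - 1) = m + 1 + (2 ^ (k - 1) - 1) by omega,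
      show 2 * m + 1 - 2 ^ k = m by omega,
      hbH, hbM]
    constructor
    · rintro (h | h | h)
      · exact absurd h (by omega)
      · exact fun h1 => absurd h1 h
      · exact fun _ => h
    · intro h
      by_cases h1 : bitm A (2 ^ (k - 1) - 1) = 1
      · exact Or.inr (Or.inr (h h1))
      · exact Or.inr (Or.inl h1)
  have okRight : ∀ i, 1 ≤ i → i ≤ m → i ≠ 2 ^ (k - 1) →
      (okAt (A * 2 ^ (m + 1) + c * 2 ^ m + B) (2 * m + 1) (m + 1 + i) ↔ okAt B m i) := by
    intro i hi1 hi2 hine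
    obtain ⟨hp1, hp2⟩ := parent_range k i hk hi1 (by omega) hine
    have hpar : parentIdx (m + 1 + i) = m + 1 + parentIdx i := by
      have := parent_add_pow k i hk hi1 (by omega) hine
      rw [hm2]; omega
    unfold okAt
    rw [hrootS, hsubroot, hpar,
      show 2 * m + 1 - (m + 1 + i) = m - i by omega,
      show 2 * m + 1 - (m + 1 + parentIdx i) = m - parentIdx i by omega,
      hbL _ (by omega), hbL _ (by omega)]
    constructor
    · rintro (h | h | h)
      · exact absurd h (by omega)
      · exact Or.inr (Or.inl h)
      · exact Or.inr (Or.inr h)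
    · rintro (h | h | h)
      · exact absurd h hine
      · exact Or.inr (Or.inl h)
      · exact Or.inr (Or.inr h)
  have okRightRoot :
      okAt (A * 2 ^ (m + 1) + c * 2 ^ m + B) (2 * m + 1) (m + 1 + 2 ^ (k - 1)) ↔
        (bitm B (2 ^ (k - 1) - 1) = 1 → c = 1) := by
    have hpar : parentIdx (m + 1 + 2 ^ (k - 1)) = 2 ^ k := by
      have := parent_add_pow_root k hk
      rw [hm2]; omega
    unfold okAt
    rw [hrootS, hpar,
      show 2 * m + 1 - (m + 1 + 2 ^ (k - 1)) = 2 ^ (k - 1) - 1 by omega,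
      show 2 * m + 1 - 2 ^ k = m by omega,
      hbL _ (by omega), hbM]
    constructor
    · rintro (h | h | h)
      · exact absurd h (by omega)
      · exact fun h1 => absurd h1 h
      · exact fun _ => h
    · intro h
      by_cases h1 : bitm B (2 ^ (k - 1) - 1) = 1
      · exact Or.inr (Or.inr (h h1))
      · exact Or.inr (Or.inl h1)
  unfold flatOK
  rw [hS, hsub]
  constructor
  · intro hf
    refine ⟨?_, ?_, ?_, ?_⟩
    · intro j hj1 hj2
      by_cases hje : j = 2 ^ (k - 1)
      · subst hje; exact Or.inl hsubroot.symm
      · exact (okLeft j hj1 hj2 hje).mp (hf j hj1 (by omega))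
    · intro i hi1 hi2
      by_cases hie : i = 2 ^ (k - 1)
      · subst hie; exact Or.inl hsubroot.symm
      · exact (okRight i hi1 hi2 hie).mp (hf (m + 1 + i) (by omega) (by omega))
    · exact okLeftRoot.mp (hf (2 ^ (k - 1)) (by omega) (by omega))
    · exact okRightRoot.mp (hf (m + 1 + 2 ^ (k - 1)) (by omega) (by omega))
  · rintro ⟨hfA, hfB, hrA, hrB⟩ j hj1 hj2
    rcases Nat.lt_or_ge j (m + 1) with hjm | hjm
    · by_cases hje : j = 2 ^ (k - 1)
      · subst hje; exact okLeftRoot.mpr hrA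
      · exact (okLeft j hj1 (by omega) hje).mpr (hfA j hj1 (by omega))
    · rcases Nat.eq_or_lt_of_le hjm with hje | hjgt
      · exact Or.inl (by omega)
      · have hji : j = m + 1 + (j - (m + 1)) := by omega
        rw [hji]
        by_cases hie : j - (m + 1) = 2 ^ (k - 1)
        · rw [hie]; exact okRightRoot.mpr hrB
        · exact (okRight (j - (m + 1)) (by omega) (by omega) hie).mpr
            (hfB (j - (m + 1)) (by omega) (by omega))

theorem flat_zero (k : Nat) : ∀ x : Int, 0 ≤ x → x < 2 ^ (2 ^ (k + 1) - 1) →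
    flatOK x k → bitm x (2 ^ k - 1) = 0 → x = 0 := by
  induction k with
  | zero =>
    intro x hx0 hx hf hb
    norm_num at hx
    unfold bitm at hb
    simp at hb
    omega
  | succ k ih =>
    intro x hx0 hx hf hb
    have hm : 2 ^ (k + 1) - 1 = 2 ^ (k + 1) - 1 := rfl
    have hpk : (2:Nat) ^ (k + 2) = 2 * 2 ^ (k + 1) := by rw [pow_succ]; ring
    have h2k : 2 ≤ 2 ^ (k + 1) := by
      calc (2:Nat) = 2 ^ 1 := rfl
      _ ≤ 2 ^ (k + 1) := Nat.pow_le_pow_right (by norm_num) (by omega)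
    have hSm : 2 ^ (k + 1 + 1) - 1 = 2 * (2 ^ (k + 1) - 1) + 1 := by omega
    rw [hSm] at hx
    obtain ⟨hxeq, hA0, hA, hcc, hB0, hB⟩ := decomp x (2 ^ (k + 1) - 1) hx0 hx
    have hbc : bitm x (2 ^ (k + 1) - 1) = 0 := hb
    have hflat : flatOK ((x / 2 ^ (2 ^ (k + 1) - 1 + 1)) * 2 ^ (2 ^ (k + 1) - 1 + 1) +
        bitm x (2 ^ (k + 1) - 1) * 2 ^ (2 ^ (k + 1) - 1) + x % 2 ^ (2 ^ (k + 1) - 1)) (k + 1) := by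
      rw [← hxeq]; exact hf
    have hdec := (flat_decomp (k + 1) (2 ^ (k + 1) - 1) (by omega) rfl
      _ _ _ hA0 hA hcc hB0 hB).mp hflat
    obtain ⟨hfA, hfB, hrA, hrB⟩ := hdec
    have hk1 : k + 1 - 1 = k := by omega
    rw [hk1] at hfA hfB hrA hrB
    have hbA : bitm (x / 2 ^ (2 ^ (k + 1) - 1 + 1)) (2 ^ k - 1) = 0 := by
      rcases bitm_cases (x / 2 ^ (2 ^ (k + 1) - 1 + 1)) (2 ^ k - 1) with h | h
      · exact h
      · rw [hbc] at hrA; exact absurd (hrA h) (by norm_num)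
    have hbB : bitm (x % 2 ^ (2 ^ (k + 1) - 1)) (2 ^ k - 1) = 0 := by
      rcases bitm_cases (x % 2 ^ (2 ^ (k + 1) - 1)) (2 ^ k - 1) with h | h
      · exact h
      · rw [hbc] at hrB; exact absurd (hrB h) (by norm_num)
    have hAz : x / 2 ^ (2 ^ (k + 1) - 1 + 1) = 0 := ih _ hA0 hA hfA hbA
    have hBz : x % 2 ^ (2 ^ (k + 1) - 1) = 0 := ih _ hB0 hB hfB hbB
    rw [hxeq, hAz, hBz, hbc]
    ring

theorem valid_iff_flat (k : Nat) : ∀ x : Int, 0 ≤ x → x < 2 ^ (2 ^ (k + 1) - 1) →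
    (validB x (2 ^ (k + 1) - 1) = true ↔ flatOK x k) := by
  induction k with
  | zero =>
    intro x hx0 hx
    norm_num
    constructor
    · intro _ j hj1 hj2
      have : j = 1 := by norm_num at hj2; omega
      subst this
      exact Or.inl (by norm_num)
    · intro _
      rw [validB]
      norm_num
  | succ k ih =>
    intro x hx0 hx
    have hpk : (2:Nat) ^ (k + 2) = 2 * 2 ^ (k + 1) := by rw [pow_succ]; ring
    have h2k : 2 ≤ 2 ^ (k + 1) := by
      calc (2:Nat) = 2 ^ 1 := rfl
      _ ≤ 2 ^ (k + 1) := Nat.pow_le_pow_right (by norm_num) (by omega)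
    have hSm : 2 ^ (k + 1 + 1) - 1 = 2 * (2 ^ (k + 1) - 1) + 1 := by omega
    rw [hSm] at hx ⊢
    obtain ⟨hxeq, hA0, hA, hcc, hB0, hB⟩ := decomp x (2 ^ (k + 1) - 1) hx0 hx
    have hstep := validB_step (x / 2 ^ (2 ^ (k + 1) - 1 + 1)) (x % 2 ^ (2 ^ (k + 1) - 1))
      (bitm x (2 ^ (k + 1) - 1)) (2 ^ (k + 1) - 1) (by omega) hA0 hB0 hB hcc
    rw [← hxeq] at hstep
    have hdec := flat_decomp (k + 1) (2 ^ (k + 1) - 1) (by omega) rfl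
      _ _ _ hA0 hA hcc hB0 hB
    rw [← hxeq] at hdec
    have hk1 : k + 1 - 1 = k := by omega
    rw [hk1] at hdec
    rw [hstep]
    rcases hcc with hc0 | hc1
    · rw [hc0] at hstep ⊢
      rw [if_pos rfl]
      constructor
      · intro hxz
        have : x = 0 := by simpa using hxz
        subst this
        intro j hj1 hj2
        exact Or.inr (Or.inl (by rw [bitm_zero]; norm_num))
      · intro hf
        have : flatOK x (k + 1) := hf
        have := flat_zero (k + 1) x hx0 (by rw [hSm]; exact hx) this hc0
        simpa using this
    · rw [hc1] at hdec ⊢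
      rw [if_neg (by norm_num)]
      rw [Bool.and_eq_true, ih _ hA0 hA, ih _ hB0 hB]
      rw [hdec]
      constructor
      · rintro ⟨h1, h2⟩
        exact ⟨h1, h2, fun _ => rfl, fun _ => rfl⟩
      · rintro ⟨h1, h2, _, _⟩
        exact ⟨h1, h2⟩

theorem tzLoop_eq (j : Nat) (hj : 1 ≤ j) :
    ∀ fuel t, t ≤ tzN j → tzN j ≤ t + fuel → tzLoop (j : Int) fuel t = tzN j := by
  have hcast : ∀ t : Nat, (PySem.Int.mod (j : Int) ((2 : Int) ^ (t + 1)) = 0 ↔ 2 ^ (t + 1) ∣ j) := by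
    intro t
    rw [PySem.Int.mod_eq_zero_iff_dvd]
    constructor
    · intro h; exact_mod_cast h
    · intro h; exact_mod_cast h
  intro fuel
  induction fuel with
  | zero =>
    intro t h1 h2
    have : t = tzN j := by omega
    simp only [tzLoop, this]
  | succ f ihf =>
    intro t h1 h2
    simp only [tzLoop]
    by_cases he : t = tzN j
    · rw [if_neg (fun hmod => tz_not_dvd j (by omega) (he ▸ (hcast t).mp hmod))]
      exact he
    · have hlt : t < tzN j := by omega
      rw [if_pos ((hcast t).mpr ((pow_dvd_pow 2 (by omega)).trans (tz_dvd j)))]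
      exact ihf (t + 1) (by omega) (by omega)

theorem tzLoop_call (j : Nat) (hj : 1 ≤ j) : tzLoop (j : Int) j 0 = tzN j := by
  have h1 : 2 ^ tzN j ≤ j := Nat.le_of_dvd (by omega) (tz_dvd j)
  have h2 : tzN j < 2 ^ tzN j := Nat.lt_two_pow_self
  exact tzLoop_eq j hj j 0 (Nat.zero_le _) (by omega)

theorem scan_one (n : Int) (s : Nat) :
    ∀ d j, s + 1 - j ≤ d → 1 ≤ j →
    (∀ j', j ≤ j' → j' ≤ s → okAt n s j') → scanLoop n s ((s + 1) / 2) j = 1 := by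
  intro d
  induction d with
  | zero =>
    intro j hd hj h
    rw [scanLoop, dif_neg (by omega)]
  | succ d ih =>
    intro j hd hj h
    by_cases hjs : j ≤ s
    · rw [scanLoop, dif_pos hjs]
      have hM : ∀ i : Nat, PySem.Int.mod (PySem.Int.floordiv n ((2 : Int) ^ i)) 2 = bitm n i := by
        intro i
        rw [PySem.Int.floordiv_eq_ediv_of_pos (by positivity),
          PySem.Int.mod_eq_emod_of_pos (by norm_num)]
        rfl
      have hT : tzLoop (j : Int) j 0 = tzN j := tzLoop_call j hj
      have hP : (if PySem.Int.mod (PySem.Int.floordiv (j : Int) ((2 : Int) ^ (tzN j + 1))) 2 = 1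
          then j - 2 ^ tzN j else j + 2 ^ tzN j) = parentIdx j := by
        have hc2 : ((2 : Int) ^ (tzN j + 1)) = ((2 ^ (tzN j + 1) : Nat) : Int) := by push_cast; ring
        have hfd : PySem.Int.floordiv (j : Int) ((2 : Int) ^ (tzN j + 1))
            = ((j / 2 ^ (tzN j + 1) : Nat) : Int) := by
          rw [hc2]; exact PySem.Int.floordiv_natCast j (2 ^ (tzN j + 1))
        have hmd : PySem.Int.mod ((j / 2 ^ (tzN j + 1) : Nat) : Int) 2
            = ((j / 2 ^ (tzN j + 1) % 2 : Nat) : Int) := by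
          exact_mod_cast PySem.Int.mod_natCast (j / 2 ^ (tzN j + 1)) 2
        rw [hfd, hmd]
        unfold parentIdx
        by_cases hb : j / 2 ^ (tzN j + 1) % 2 = 1
        · rw [if_pos (by exact_mod_cast hb), if_pos hb]
        · rw [if_neg (fun h => hb (by exact_mod_cast h)), if_neg hb]
      have hrec : scanLoop n s ((s + 1) / 2) (j + 1) = 1 :=
        ih (j + 1) (by omega) (by omega) (fun j' h1 h2 => h j' (by omega) h2)
      by_cases hcond : j ≠ (s + 1) / 2 ∧
          PySem.Int.mod (PySem.Int.floordiv n ((2 : Int) ^ (s - j))) 2 = 1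
      · rw [if_pos hcond]
        simp only [hT, hP]
        have hok := h j le_rfl hjs
        have hbit : bitm n (s - parentIdx j) = 1 := by
          rcases hok with h0 | h0 | h0
          · exact absurd h0 hcond.1
          · rw [hM (s - j)] at hcond; exact absurd hcond.2 h0
          · exact h0
        rw [hM (s - parentIdx j), if_neg (by rw [hbit]; norm_num)]
        exact hrec
      · rw [if_neg hcond]
        exact hrec
    · rw [scanLoop, dif_neg hjs]

theorem scan_zero (n : Int) (s : Nat) :
    ∀ d j, s + 1 - j ≤ d → 1 ≤ j →
    (∃ j', j ≤ j' ∧ j' ≤ s ∧ ¬ okAt n s j') → scanLoop n s ((s + 1) / 2) j = 0 := by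
  intro d
  induction d with
  | zero =>
    intro j hd hj hex
    obtain ⟨j', h1, h2, _⟩ := hex
    omega
  | succ d ih =>
    intro j hd hj hex
    have hjs : j ≤ s := by obtain ⟨j', h1, h2, _⟩ := hex; omega
    rw [scanLoop, dif_pos hjs]
    have hM : ∀ i : Nat, PySem.Int.mod (PySem.Int.floordiv n ((2 : Int) ^ i)) 2 = bitm n i := by
      intro i
      rw [PySem.Int.floordiv_eq_ediv_of_pos (by positivity),
        PySem.Int.mod_eq_emod_of_pos (by norm_num)]
      rfl
    have hT : tzLoop (j : Int) j 0 = tzN j := tzLoop_call j hj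
    have hP : (if PySem.Int.mod (PySem.Int.floordiv (j : Int) ((2 : Int) ^ (tzN j + 1))) 2 = 1
        then j - 2 ^ tzN j else j + 2 ^ tzN j) = parentIdx j := by
      have hc2 : ((2 : Int) ^ (tzN j + 1)) = ((2 ^ (tzN j + 1) : Nat) : Int) := by push_cast; ring
      have hfd : PySem.Int.floordiv (j : Int) ((2 : Int) ^ (tzN j + 1))
          = ((j / 2 ^ (tzN j + 1) : Nat) : Int) := by
        rw [hc2]; exact PySem.Int.floordiv_natCast j (2 ^ (tzN j + 1))
      have hmd : PySem.Int.mod ((j / 2 ^ (tzN j + 1) : Nat) : Int) 2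
          = ((j / 2 ^ (tzN j + 1) % 2 : Nat) : Int) := by
        exact_mod_cast PySem.Int.mod_natCast (j / 2 ^ (tzN j + 1)) 2
      rw [hfd, hmd]
      unfold parentIdx
      by_cases hb : j / 2 ^ (tzN j + 1) % 2 = 1
      · rw [if_pos (by exact_mod_cast hb), if_pos hb]
      · rw [if_neg (fun h => hb (by exact_mod_cast h)), if_neg hb]
    by_cases hok : okAt n s j
    · have hex' : ∃ j', j + 1 ≤ j' ∧ j' ≤ s ∧ ¬ okAt n s j' := by
        obtain ⟨j', h1, h2, h3⟩ := hex
        refine ⟨j', ?_, h2, h3⟩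
        rcases Nat.eq_or_lt_of_le h1 with rfl | hlt
        · exact absurd hok h3
        · omega
      have hrec := ih (j + 1) (by omega) (by omega) hex'
      by_cases hcond : j ≠ (s + 1) / 2 ∧
          PySem.Int.mod (PySem.Int.floordiv n ((2 : Int) ^ (s - j))) 2 = 1
      · rw [if_pos hcond]
        simp only [hT, hP]
        have hbit : bitm n (s - parentIdx j) = 1 := by
          rcases hok with h0 | h0 | h0
          · exact absurd h0 hcond.1
          · rw [hM (s - j)] at hcond; exact absurd hcond.2 h0
          · exact h0
        rw [hM (s - parentIdx j), if_neg (by rw [hbit]; norm_num)]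
        exact hrec
      · rw [if_neg hcond]
        exact hrec
    · unfold okAt at hok
      push_neg at hok
      obtain ⟨hr, hb1, hb2⟩ := hok
      rw [if_pos ⟨hr, by rw [hM (s - j)]; exact hb1⟩]
      simp only [hT, hP]
      have hb0 : bitm n (s - parentIdx j) = 0 := by
        rcases bitm_cases n (s - parentIdx j) with h0 | h0
        · exact h0
        · exact absurd h0 hb2
      rw [hM (s - parentIdx j), if_pos hb0]

theorem elem_eq (n : Int) (hn : 1 ≤ n) :
    (if treeA (padLoop (convertTwo n []) (convertTwo n []).length (convertTwo n []).length 0)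
      then (1 : Int) else 0) = scanLoop n (sizeLoop n 1) ((sizeLoop n 1 + 1) / 2) 1 := by
  obtain ⟨hbin, hval, hlpos, hlo, hhi⟩ := convert_spec n.toNat n le_rfl hn
  set xs := convertTwo n [] with hxs
  set L := xs.length with hL
  set K := Nat.log 2 L with hK
  have hloglt : K < L := Nat.log_lt_of_lt_pow (by omega) Nat.lt_two_pow_self
  have hS1 : L ≤ 2 ^ (K + 1) - 1 := by
    have := Nat.lt_pow_succ_log_self (b := 2) (by norm_num) L
    rw [← hK] at this
    omega
  have hpad : padLoop xs L L 0 = List.replicate (2 ^ (K + 1) - 1 - L) '0' ++ xs :=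
    padLoop_spec xs L hlpos L 0 (Nat.zero_le _) (by omega) (by simpa using hlpos)
  have hplen : (List.replicate (2 ^ (K + 1) - 1 - L) '0' ++ xs).length = 2 ^ (K + 1) - 1 := by
    simp; omega
  have hpbin : ∀ c ∈ List.replicate (2 ^ (K + 1) - 1 - L) '0' ++ xs, c = '0' ∨ c = '1' := by
    intro c hc
    rcases List.mem_append.mp hc with h | h
    · exact Or.inl (List.eq_of_mem_replicate h)
    · exact hbin c h
  have hpval : val (List.replicate (2 ^ (K + 1) - 1 - L) '0' ++ xs) = n := by
    rw [val_append, val_replicate_zero, hval]; ring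
  have htree := tree_eq_valid K (List.replicate (2 ^ (K + 1) - 1 - L) '0' ++ xs) hpbin (by omega)
  rw [hplen, hpval] at htree
  have hsize : sizeLoop n 1 = 2 ^ (K + 1) - 1 := by
    have h21 : (2 : Nat) ^ 1 - 1 = 1 := rfl
    rw [← h21]
    exact sizeLoop_spec n L hlpos hlo hhi L 1 (by omega) le_rfl (by simpa using hlpos)
  have hnS : n < 2 ^ (2 ^ (K + 1) - 1) :=
    lt_of_lt_of_le hhi (pow_le_pow_right₀ (by norm_num) hS1)
  have hvf := valid_iff_flat K n (by omega) hnS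
  rw [hpad, htree, hsize]
  by_cases hf : flatOK n K
  · rw [hvf.mpr hf, if_pos rfl]
    exact (scan_one n (2 ^ (K + 1) - 1) (2 ^ (K + 1)) 1 (by omega) le_rfl
      (fun j' h1 h2 => hf j' h1 h2)).symm
  · have hvb : validB n (2 ^ (K + 1) - 1) = false := by
      rcases Bool.eq_false_or_eq_true (validB n (2 ^ (K + 1) - 1)) with h | h
      · exact absurd (hvf.mp h) hf
      · exact h
    rw [hvb, if_neg (by norm_num)]
    unfold flatOK at hf
    push_neg at hf
    obtain ⟨j, h1, h2, h3⟩ := hf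
    exact (scan_zero n (2 ^ (K + 1) - 1) (2 ^ (K + 1)) 1 (by omega) le_rfl ⟨j, h1, h2, h3⟩).symm

-- ===== VERDICT (by name: the statement is the Claim_ definition above) =====
theorem solution_spec : Claim_equal_solution := by
  intro numbers _hdom hpre
  unfold Spec_solution solution solution_alt
  rw [PySem.List.foldl_append_singleton_eq_map
    (fun number => if treeA (padLoop (convertTwo number [])
      (convertTwo number []).length (convertTwo number []).length 0) then (1 : Int) else 0)]
  rw [PySem.List.foldl_append_singleton_eq_map
    (fun n => scanLoop n (sizeLoop n 1) ((sizeLoop n 1 + 1) / 2) 1)]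
  simp only [List.nil_append]
  exact List.map_congr_left (fun n hn => elem_eq n (hpre n hn))
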